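-- pv_equiv track=rewrite | github.com/microsoft/repoclassbench | repotools/csharp_tools/omnisharp_api.py | get_lc
-- ===== SOURCE A (Python) =====
-- def get_lc(content: str, idx: int):
--     """ Given an index to a string position, get corresp line and char number """
--     l, c = 0, 0
--     current_idx = 0
--     lines = content.split("\n")
--     for line in lines:
--         if current_idx + len(line) >= idx:
--             c = idx - current_idx
--             break
--         current_idx += len(line) + 1
--         l += 1
--     return l, c
-- ===== SOURCE B (Python) =====
-- def get_lc(content: str, idx: int):
--     """ Given an index to a string position, get corresp line and char number """
--     l = 0
--     line_start = 0
--     i = 0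
--     for ch in content:
--         if ch == "\n":
--             if i >= idx:
--                 return l, idx - line_start
--             l += 1
--             line_start = i + 1
--         i += 1
--     if i >= idx:
--         return l, idx - line_start
--     return l + 1, 0
-- ===== Notes on version B (the rewrite author's own statement) =====
-- stated objective: alternative
-- what changed: B replaces A's split('\n') pass plus a loop over the resulting line list by a single character-by-character scan that tracks the current line number and the index after the last newline, so no list of lines is ever built.
import Mathlib
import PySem

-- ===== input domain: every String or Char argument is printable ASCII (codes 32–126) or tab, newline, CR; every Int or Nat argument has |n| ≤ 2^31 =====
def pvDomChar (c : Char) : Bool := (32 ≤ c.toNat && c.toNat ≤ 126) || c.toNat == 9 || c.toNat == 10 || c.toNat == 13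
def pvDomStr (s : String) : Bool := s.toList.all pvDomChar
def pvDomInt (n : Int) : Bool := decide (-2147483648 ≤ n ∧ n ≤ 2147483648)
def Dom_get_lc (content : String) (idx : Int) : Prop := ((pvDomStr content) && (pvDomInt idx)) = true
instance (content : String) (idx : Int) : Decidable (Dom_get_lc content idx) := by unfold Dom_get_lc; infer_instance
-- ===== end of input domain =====

-- B replaces A's split-into-lines pass by a single character scan tracking the current
-- line number and line start (objective: alternative decomposition, no lines list built).

-- ===== PORT A =====
-- the `for line in lines` loop of A; state (l, current_idx); loop exhaustion gives (l, 0) (c stays 0)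
def getLcLoopA (idx : Int) : List (List Char) → Int → Int → Int × Int
  | [], l, _current_idx => (l, 0)
  | line :: rest, l, current_idx =>
    if idx ≤ current_idx + (line.length : Int) then (l, idx - current_idx)
    else getLcLoopA idx rest (l + 1) (current_idx + (line.length : Int) + 1)

-- content.split("\n"): the separator "\n" is nonempty, so Python's split is Chars.splitOn
def get_lc (content : String) (idx : Int) : Int × Int :=
  getLcLoopA idx (PySem.Chars.splitOn content.toList ['\n']) 0 0

-- ===== PORT B =====
-- Source B's `for ch in content` loop; state (i, l, line_start); after the loop i = len(content)
def getLcLoopB (idx : Int) : List Char → Int → Int → Int → Int × Int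
  | [], i, l, line_start => if idx ≤ i then (l, idx - line_start) else (l + 1, 0)
  | ch :: rest, i, l, line_start =>
    if ch = '\n' then
      if idx ≤ i then (l, idx - line_start)
      else getLcLoopB idx rest (i + 1) (l + 1) (i + 1)
    else getLcLoopB idx rest (i + 1) l line_start

def get_lc_alt (content : String) (idx : Int) : Int × Int :=
  getLcLoopB idx content.toList 0 0 0

-- ===== PRECONDITION & SPEC =====
def Spec_get_lc (content : String) (idx : Int) (out : Int × Int) : Prop := out = get_lc_alt content idx
instance (content : String) (idx : Int) (out : Int × Int) : Decidable (Spec_get_lc content idx out) := by unfold Spec_get_lc; infer_instance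

-- ===== CLAIM (what is proved, stated in full; the proofs are below) =====
def Claim_equal_get_lc : Prop := ∀ (content : String) (idx : Int), Dom_get_lc content idx → Spec_get_lc content idx (get_lc content idx)

-- ===== LEMMAS AND PROOFS =====

-- reference split-on-'\n' (Python semantics: "".split("\n") = [""]), structural recursion
def splitNl : List Char → List (List Char)
  | [] => [[]]
  | c :: r =>
    if c = '\n' then [] :: splitNl r
    else match splitNl r with
      | h :: t => (c :: h) :: t
      | [] => [[c]]

theorem splitNl_ne_nil (cs : List Char) : splitNl cs ≠ [] := by
  cases cs with
  | nil => simp [splitNl]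
  | cons c r =>
    simp only [splitNl]
    split
    · simp
    · cases h : splitNl r <;> simp

theorem splitOn_go_spec (l : List Char) : ∀ (cur : List Char) (acc : List (List Char)),
    PySem.Chars.splitOn.go ['\n'] (l.length + 1) l cur acc =
      acc.reverse ++ (match splitNl l with
        | h :: t => (cur.reverse ++ h) :: t
        | [] => []) := by
  induction l with
  | nil => intro cur acc; simp [PySem.Chars.splitOn.go, splitNl]
  | cons c r ih =>
    intro cur acc
    by_cases hc : c = '\n'
    · subst hc
      rw [show (('\n' :: r).length + 1) = (r.length + 1) + 1 by simp]
      rw [PySem.Chars.splitOn.go]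
      simp only [List.isPrefixOf, beq_self_eq_true, Bool.and_true, if_true]
      simp only [List.length_cons, List.length_nil, List.drop_succ_cons, List.drop_zero]
      rw [ih]
      simp only [splitNl]
      cases h : splitNl r with
      | nil => exact absurd h (splitNl_ne_nil r)
      | cons h' t => simp
    · rw [show ((c :: r).length + 1) = (r.length + 1) + 1 by simp]
      rw [PySem.Chars.splitOn.go]
      have hpre : List.isPrefixOf ['\n'] (c :: r) = false := by
        simp [List.isPrefixOf]
        exact fun h => hc h.symm
      simp only [hpre, Bool.false_eq_true, if_false]
      rw [ih]
      simp only [splitNl, if_neg hc]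
      cases h : splitNl r with
      | nil => exact absurd h (splitNl_ne_nil r)
      | cons h' t => simp
  
theorem splitOn_eq_splitNl (cs : List Char) :
    PySem.Chars.splitOn cs ['\n'] = splitNl cs := by
  unfold PySem.Chars.splitOn
  rw [splitOn_go_spec]
  cases h : splitNl cs with
  | nil => exact absurd h (splitNl_ne_nil cs)
  | cons h' t => simp

theorem loopB_eq (idx : Int) (cs : List Char) : ∀ (i l ls : Int),
    getLcLoopB idx cs i l ls =
      (match splitNl cs with
        | h :: t =>
          if idx ≤ i + (h.length : Int) then (l, idx - ls)
          else getLcLoopA idx t (l + 1) (i + (h.length : Int) + 1)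
        | [] => (0, 0)) := by
  induction cs with
  | nil =>
    intro i l ls
    simp only [getLcLoopB, splitNl, List.length_nil, Int.natCast_zero, add_zero, getLcLoopA]
  | cons c r ih =>
    intro i l ls
    by_cases hc : c = '\n'
    · subst hc
      have hs : splitNl ('\n' :: r) = [] :: splitNl r := by simp [splitNl]
      rw [hs]
      simp only [getLcLoopB, if_true, List.length_nil, Int.natCast_zero,
        add_zero]
      by_cases hi : idx ≤ i
      · simp [hi]
      · simp only [if_neg hi]
        rw [ih]
        cases h : splitNl r with
        | nil => exact absurd h (splitNl_ne_nil r)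
        | cons h' t => simp only [getLcLoopA]
    · have hs : splitNl (c :: r) = (c :: (splitNl r).headI) :: (splitNl r).tail := by
        simp only [splitNl, if_neg hc]
        cases h : splitNl r with
        | nil => exact absurd h (splitNl_ne_nil r)
        | cons h' t => simp
      rw [hs]
      simp only [getLcLoopB, if_neg hc]
      rw [ih]
      cases h : splitNl r with
      | nil => exact absurd h (splitNl_ne_nil r)
      | cons h' t =>
        simp only [List.headI, List.tail, List.length_cons]
        push_cast
        ring_nf

theorem loopB_start (idx : Int) (cs : List Char) (l j : Int) :
    getLcLoopB idx cs j l j = getLcLoopA idx (splitNl cs) l j := by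
  rw [loopB_eq]
  cases h : splitNl cs with
  | nil => exact absurd h (splitNl_ne_nil cs)
  | cons h' t => simp [getLcLoopA]

-- ===== VERDICT (by name: the statement is the Claim_ definition above) =====
theorem get_lc_spec : Claim_equal_get_lc := by
  intro content idx _
  unfold Spec_get_lc get_lc get_lc_alt
  rw [splitOn_eq_splitNl, ← loopB_start]
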